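-- pv_equiv track=rewrite | github.com/Michal0ss/WDI | WDI_algo/Zestaw_3/z107.py | does_num_contain_prime
-- ===== SOURCE A (Python) =====
-- import math
--
-- def does_num_contain_prime(x):
--     def is_prime(n):
--         if n <= 1:
--             return False
--         for i in range(2, int(math.sqrt(n)) + 1):
--             if n % i == 0:
--                 return False
--         return True
--
--     while x>0:
--         digit=x%10
--         if is_prime(digit):
--             return True
--         x//=10
--     return False
-- ===== SOURCE B (Python) =====
-- def does_num_contain_prime(x):
--     if x <= 0:
--         return False
--     return bool(set(str(x)) & {'2', '3', '5', '7'})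
-- ===== Notes on version B (the rewrite author's own statement) =====
-- stated objective: simpler
-- what changed: replaces the arithmetic digit-peeling loop with trial-division primality by a set intersection of the decimal string's characters with the literal prime-digit set {'2','3','5','7'}
import Mathlib
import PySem

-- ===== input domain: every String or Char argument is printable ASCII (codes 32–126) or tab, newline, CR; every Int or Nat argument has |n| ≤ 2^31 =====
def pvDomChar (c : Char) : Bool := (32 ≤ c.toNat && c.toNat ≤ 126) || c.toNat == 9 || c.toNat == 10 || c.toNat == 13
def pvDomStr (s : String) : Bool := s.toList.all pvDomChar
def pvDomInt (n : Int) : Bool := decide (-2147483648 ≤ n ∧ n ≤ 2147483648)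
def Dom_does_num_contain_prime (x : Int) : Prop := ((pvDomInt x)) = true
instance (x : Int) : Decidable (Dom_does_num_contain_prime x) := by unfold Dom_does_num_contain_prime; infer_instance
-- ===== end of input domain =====

-- B replaces A's digit-peeling loop with per-digit trial-division primality by a set
-- intersection of the decimal string's characters with the literal set {'2','3','5','7'}
-- (objective: simpler).

-- ===== PORT A =====
-- helper is_prime, transliterated; int(math.sqrt(n)) is ported as Int.sqrt n, exact for
-- every argument this helper receives (the digits 0–9, on which math.sqrt is exact).
def pvIsPrime (n : Int) : Bool :=
  if n ≤ 1 then false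
  else (PySem.List.pyRange 2 (Int.sqrt n + 1) 1).all (fun i => PySem.Int.mod n i != 0)

def does_num_contain_prime (x : Int) : Bool :=
  if _h : 0 < x then
    if pvIsPrime (PySem.Int.mod x 10) then true
    else does_num_contain_prime (PySem.Int.floordiv x 10)
  else false
termination_by x.toNat
decreasing_by
  rw [PySem.Int.floordiv_eq_ediv_of_pos (by norm_num)]
  omega

-- ===== PORT B =====
def does_num_contain_prime_alt (x : Int) : Bool :=
  if x ≤ 0 then false
  else !(PySem.Set.inter (PySem.Set.ofList (PySem.Int.toChars x))
          (PySem.Set.ofList ['2', '3', '5', '7'])).isEmpty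

-- ===== PRECONDITION & SPEC =====
def Spec_does_num_contain_prime (x : Int) (out : Bool) : Prop := out = does_num_contain_prime_alt x
instance (x : Int) (out : Bool) : Decidable (Spec_does_num_contain_prime x out) := by unfold Spec_does_num_contain_prime; infer_instance

-- ===== CLAIM (what is proved, stated in full; the proofs are below) =====
def Claim_equal_does_num_contain_prime : Prop := ∀ (x : Int), Dom_does_num_contain_prime x → Spec_does_num_contain_prime x (does_num_contain_prime x)

-- ===== LEMMAS AND PROOFS =====

-- "is a prime-digit character" (proof-only reference predicate)
def pvP (c : Char) : Bool := c == '2' || c == '3' || c == '5' || c == '7'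

-- whether some decimal digit of n is one of 2, 3, 5, 7 (proof-only reference function)
def pvPrimeDigits (n : Nat) : Bool :=
  (n % 10 == 2 || n % 10 == 3 || n % 10 == 5 || n % 10 == 7) ||
  (if h : n / 10 = 0 then false else pvPrimeDigits (n / 10))
termination_by n
decreasing_by omega

theorem pvPrimeDigits_eq (n : Nat) :
    pvPrimeDigits n =
      ((n % 10 == 2 || n % 10 == 3 || n % 10 == 5 || n % 10 == 7) ||
       (if n / 10 = 0 then false else pvPrimeDigits (n / 10))) := by
  rw [pvPrimeDigits]
  simp

theorem pvP_digitChar (m : Nat) (h : m < 10) :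
    pvP (Nat.digitChar m) = (m == 2 || m == 3 || m == 5 || m == 7) := by
  interval_cases m <;> decide

theorem pvIsPrime_digit (m : Nat) (h : m < 10) :
    pvIsPrime ((m : Nat) : Int) = (m == 2 || m == 3 || m == 5 || m == 7) := by
  have s2 : Int.sqrt 2 = 1 := by simp [Int.sqrt]; try norm_num
  have s3 : Int.sqrt 3 = 1 := by simp [Int.sqrt]; try norm_num
  have s4 : Int.sqrt 4 = 2 := by simp [Int.sqrt]; try norm_num
  have s5 : Int.sqrt 5 = 2 := by simp [Int.sqrt]; try norm_num
  have s6 : Int.sqrt 6 = 2 := by simp [Int.sqrt]; try norm_num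
  have s7 : Int.sqrt 7 = 2 := by simp [Int.sqrt]; try norm_num
  have s8 : Int.sqrt 8 = 2 := by simp [Int.sqrt]; try norm_num
  have s9 : Int.sqrt 9 = 3 := by simp [Int.sqrt]; try norm_num
  interval_cases m <;>
    simp only [pvIsPrime, Nat.cast_ofNat, Nat.cast_zero, Nat.cast_one,
      s2, s3, s4, s5, s6, s7, s8, s9] <;>
    decide

-- some character of Nat.toDigitsCore 10 fuel n ds is a prime digit iff a digit of n is
-- prime or some character of ds is a prime digit
theorem pvToDigitsCore_prime (fuel : Nat) :
    ∀ (n : Nat) (ds : List Char), n < fuel →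
      (Nat.toDigitsCore 10 fuel n ds).any pvP = (pvPrimeDigits n || ds.any pvP) := by
  induction fuel with
  | zero => intro n ds h; omega
  | succ fuel ih =>
    intro n ds h
    show (if n / 10 = 0 then Nat.digitChar (n % 10) :: ds
        else Nat.toDigitsCore 10 fuel (n / 10) (Nat.digitChar (n % 10) :: ds)).any pvP = _
    rw [pvPrimeDigits_eq]
    have hd := pvP_digitChar (n % 10) (Nat.mod_lt _ (by norm_num))
    by_cases h0 : n / 10 = 0
    · rw [if_pos h0, if_pos h0, List.any_cons, hd, Bool.or_false]
    · rw [if_neg h0, if_neg h0, ih (n / 10) _ (by omega), List.any_cons, hd]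
      cases pvPrimeDigits (n / 10) <;> cases ds.any pvP <;>
        cases (n % 10 == 2 || n % 10 == 3 || n % 10 == 5 || n % 10 == 7) <;> rfl

-- A's loop computes pvPrimeDigits of the natural number
theorem pvA_eq (n : Nat) : 0 < n → does_num_contain_prime (n : Int) = pvPrimeDigits n := by
  induction n using Nat.strong_induction_on with
  | _ n ih =>
    intro hn
    rw [does_num_contain_prime, dif_pos (by exact_mod_cast hn), pvPrimeDigits_eq]
    have hmod : PySem.Int.mod (n : Int) 10 = ((n % 10 : Nat) : Int) := by
      exact_mod_cast PySem.Int.mod_natCast n 10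
    have hdiv : PySem.Int.floordiv (n : Int) 10 = ((n / 10 : Nat) : Int) := by
      exact_mod_cast PySem.Int.floordiv_natCast n 10
    rw [hmod, hdiv, pvIsPrime_digit (n % 10) (Nat.mod_lt _ (by norm_num))]
    by_cases hp : (n % 10 == 2 || n % 10 == 3 || n % 10 == 5 || n % 10 == 7) = true
    · rw [if_pos hp, hp, Bool.true_or]
    · rw [Bool.not_eq_true] at hp
      rw [hp, if_neg (by simp), Bool.false_or]
      by_cases h0 : n / 10 = 0
      · rw [h0, if_pos rfl, Nat.cast_zero, does_num_contain_prime]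
        norm_num
      · rw [if_neg h0, ih (n / 10) (by omega) (by omega)]

-- B's set intersection is nonempty iff pvPrimeDigits holds
theorem pvB_eq (n : Nat) : 0 < n → does_num_contain_prime_alt (n : Int) = pvPrimeDigits n := by
  intro hn
  rw [does_num_contain_prime_alt, if_neg (by exact_mod_cast Nat.not_le.mpr hn)]
  have hchars : PySem.Int.toChars (n : Int) = Nat.toDigits 10 n := by
    simp [PySem.Int.toChars]
  have hmem : ∀ c : Char, c ∈ ['2', '3', '5', '7'] ↔ pvP c = true := by
    intro c; simp [pvP]; tauto
  have hany : (Nat.toDigits 10 n).any pvP = pvPrimeDigits n := by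
    rw [Nat.toDigits, pvToDigitsCore_prime (n + 1) n [] (by omega), List.any_nil,
      Bool.or_false]
  rcases hb : pvPrimeDigits n with _ | _
  · -- no prime digit: the intersection is empty
    rw [Bool.not_eq_false', List.isEmpty_iff]
    by_contra hne
    rcases List.exists_mem_of_ne_nil _ hne with ⟨c, hc⟩
    rw [PySem.Set.mem_inter, PySem.Set.mem_ofList, PySem.Set.mem_ofList, hchars, hmem] at hc
    have : (Nat.toDigits 10 n).any pvP = true := List.any_eq_true.2 ⟨c, hc.1, hc.2⟩
    rw [hany, hb] at this
    exact Bool.false_ne_true this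
  · -- a prime digit exists: the intersection is nonempty
    rcases List.any_eq_true.1 (hany.trans hb) with ⟨c, hc1, hc2⟩
    rw [Bool.not_eq_true', Bool.eq_false_iff]
    intro hemp
    rw [List.isEmpty_iff] at hemp
    have : c ∈ PySem.Set.inter (PySem.Set.ofList (PySem.Int.toChars (n : Int)))
        (PySem.Set.ofList ['2', '3', '5', '7']) := by
      rw [PySem.Set.mem_inter, PySem.Set.mem_ofList, PySem.Set.mem_ofList, hchars, hmem]
      exact ⟨hc1, hc2⟩
    rw [hemp] at this
    exact absurd this (List.not_mem_nil)

-- ===== VERDICT (by name: the statement is the Claim_ definition above) =====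
theorem does_num_contain_prime_spec : Claim_equal_does_num_contain_prime := by
  intro x _
  unfold Spec_does_num_contain_prime
  by_cases hx : 0 < x
  · have hx' : x = ((x.toNat : Nat) : Int) := by omega
    rw [hx', pvA_eq x.toNat (by omega), pvB_eq x.toNat (by omega)]
  · rw [does_num_contain_prime, dif_neg hx,
      does_num_contain_prime_alt, if_pos (by omega)]
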